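-- pv_equiv track=rewrite | github.com/D-Star-AI/dsRAG | dsrag/dsparse/semantic_sectioning.py | get_document_with_lines
-- ===== SOURCE A (Python) =====
-- from typing import List, Dict, Any
--
-- def get_document_with_lines(document_lines: List[Dict], start_line: int, max_characters: int) -> str:
--     document_with_line_numbers = ""
--     character_count = 0
--     for i in range(start_line, len(document_lines)):
--         line = document_lines[i]["content"]
--         document_with_line_numbers += f"[{i}] {line}\n"
--         character_count += len(line)
--         if character_count > max_characters or i == len(document_lines) - 1:
--             end_line = i
--             break
--     return document_with_line_numbers, end_line
-- ===== SOURCE B (Python) =====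
-- def get_document_with_lines(document_lines, start_line, max_characters):
--     n = len(document_lines)
--     character_count = 0
--     for i in range(start_line, n):
--         character_count += len(document_lines[i]["content"])
--         if character_count > max_characters or i == n - 1:
--             end_line = i
--             break
--     document_with_line_numbers = "".join(
--         f"[{i}] {document_lines[i]['content']}\n" for i in range(start_line, end_line + 1)
--     )
--     return document_with_line_numbers, end_line
-- ===== Notes on version B (the rewrite author's own statement) =====
-- stated objective: alternative
-- what changed: A formats and accumulates the output string inside the budget loop; B first runs a scan over raw content lengths only to find end_line, then builds the output in a separate pass as ''.join over range(start_line, end_line+1).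
import Mathlib
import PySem

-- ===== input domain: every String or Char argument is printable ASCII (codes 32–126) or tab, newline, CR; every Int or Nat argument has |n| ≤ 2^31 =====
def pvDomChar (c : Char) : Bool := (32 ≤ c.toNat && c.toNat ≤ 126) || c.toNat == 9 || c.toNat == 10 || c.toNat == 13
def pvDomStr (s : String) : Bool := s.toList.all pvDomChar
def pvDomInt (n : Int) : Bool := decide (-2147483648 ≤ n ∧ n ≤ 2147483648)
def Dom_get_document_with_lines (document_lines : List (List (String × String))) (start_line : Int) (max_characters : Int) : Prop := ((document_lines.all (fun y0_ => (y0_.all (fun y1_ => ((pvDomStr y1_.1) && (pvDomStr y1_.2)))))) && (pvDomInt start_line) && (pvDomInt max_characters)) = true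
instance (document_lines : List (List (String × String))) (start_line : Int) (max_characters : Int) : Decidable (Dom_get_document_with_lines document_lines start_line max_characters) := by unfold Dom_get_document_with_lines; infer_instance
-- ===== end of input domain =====

-- B replaces A's single accumulate-and-format loop by two passes: a boundary scan over raw
-- content lengths that only finds end_line, then a join over range(start_line, end_line+1)
-- that builds the output (objective: alternative decomposition; same asymptotic cost).

-- document_lines[i]["content"]  (shared by both ports: the identical indexing/lookup expression)
def pvLineAt (dl : List (List (String × String))) (i : Int) : String :=
  ((PySem.Dict.mk ((PySem.List.pyGet? dl i).getD [])).get? "content").getD ""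

-- ===== PORT A =====
-- the for-loop of A: state = (document_with_line_numbers, character_count); breaks return (acc, i)
def pvLoopA (dl : List (List (String × String))) (mx : Int) :
    List Int → String → Int → String × Int
  | [], acc, _ => (acc, 0)   -- loop falls through: Python raises UnboundLocalError (outside Pre_)
  | i :: rest, acc, cc =>
      let line := pvLineAt dl i
      let acc2 := acc ++ "[" ++ PySem.Int.toStr i ++ "] " ++ line ++ "\n"
      let cc2 := cc + PySem.Str.len line
      if cc2 > mx ∨ i = (dl.length : Int) - 1 then (acc2, i)
      else pvLoopA dl mx rest acc2 cc2

def get_document_with_lines (document_lines : List (List (String × String))) (start_line : Int) (max_characters : Int) : String × Int :=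
  pvLoopA document_lines max_characters
    (PySem.List.pyRange start_line (document_lines.length : Int) 1) "" 0

-- ===== PORT B =====
-- first pass of B: only the character budget, returns end_line (none = loop fell through)
def pvFindEnd (dl : List (List (String × String))) (mx : Int) :
    List Int → Int → Option Int
  | [], _ => none
  | i :: rest, cc =>
      let cc2 := cc + PySem.Str.len (pvLineAt dl i)
      if cc2 > mx ∨ i = (dl.length : Int) - 1 then some i
      else pvFindEnd dl mx rest cc2

-- f"[{i}] {document_lines[i]['content']}\n"
def pvFmt (dl : List (List (String × String))) (i : Int) : String :=
  "[" ++ PySem.Int.toStr i ++ "] " ++ pvLineAt dl i ++ "\n"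

-- "".join(f"[{i}] …\n" for i in range(start_line, end_line + 1))
def pvBuildB (dl : List (List (String × String))) (s e : Int) : String :=
  PySem.Str.join "" ((PySem.List.pyRange s (e + 1) 1).map (pvFmt dl))

def get_document_with_lines_alt (document_lines : List (List (String × String))) (start_line : Int) (max_characters : Int) : String × Int :=
  match pvFindEnd document_lines max_characters
      (PySem.List.pyRange start_line (document_lines.length : Int) 1) 0 with
  | none => ("", 0)   -- Python raises UnboundLocalError here (outside Pre_)
  | some e => (pvBuildB document_lines start_line e, e)

-- ===== PRECONDITION & SPEC =====
-- Pre_ holds exactly where Python A returns: start_line must address an existing line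
-- (else UnboundLocalError / IndexError), and any visited line dict without a "content" key
-- must lie strictly past the break point — i.e. the raw content lengths accumulated before it
-- already exceed the budget (else A raises KeyError on reaching it).
def Pre_get_document_with_lines (document_lines : List (List (String × String))) (start_line : Int) (max_characters : Int) : Prop :=
  -(document_lines.length : Int) ≤ start_line ∧ start_line < (document_lines.length : Int) ∧
  ∀ i ∈ PySem.List.pyRange start_line (document_lines.length : Int) 1,
    ((PySem.Dict.mk ((PySem.List.pyGet? document_lines i).getD [])).get? "content").isSome = false →
    (start_line < i ∧ max_characters <
      ((PySem.List.pyRange start_line i 1).map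
        (fun j => PySem.Str.len
          (((PySem.Dict.mk ((PySem.List.pyGet? document_lines j).getD [])).get? "content").getD ""))).sum)
instance (document_lines : List (List (String × String))) (start_line : Int) (max_characters : Int) : Decidable (Pre_get_document_with_lines document_lines start_line max_characters) := by unfold Pre_get_document_with_lines; infer_instance

def pvWitness_get_document_with_lines : (List (List (String × String))) × Int × Int :=
  ([[("content", "ab")], [("content", "c")]], 0, 1)

def Spec_get_document_with_lines (document_lines : List (List (String × String))) (start_line : Int) (max_characters : Int) (out : String × Int) : Prop := out = get_document_with_lines_alt document_lines start_line max_characters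
instance (document_lines : List (List (String × String))) (start_line : Int) (max_characters : Int) (out : String × Int) : Decidable (Spec_get_document_with_lines document_lines start_line max_characters out) := by unfold Spec_get_document_with_lines; infer_instance

-- ===== CLAIM (what is proved, stated in full; the proofs are below) =====
def Claim_equal_get_document_with_lines : Prop := ∀ (document_lines : List (List (String × String))) (start_line : Int) (max_characters : Int), Dom_get_document_with_lines document_lines start_line max_characters → Pre_get_document_with_lines document_lines start_line max_characters → Spec_get_document_with_lines document_lines start_line max_characters (get_document_with_lines document_lines start_line max_characters)

-- ===== LEMMAS AND PROOFS =====

lemma pvInterNil : ∀ (L : List (List Char)), ([] : List Char).intercalate L = L.flatten := by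
  intro L
  induction L with
  | nil => rfl
  | cons a t ih =>
    cases t with
    | nil => simp [List.intercalate]
    | cons b u =>
      simp only [List.intercalate, List.intersperse] at ih ⊢
      simp [ih]

lemma pvJoin_cons (x : String) (L : List String) :
    PySem.Str.join "" (x :: L) = x ++ PySem.Str.join "" L := by
  simp [PySem.Str.join, PySem.Chars.join, pvInterNil]



lemma pvBuildB_singleton (dl : List (List (String × String))) (s : Int) :
    pvBuildB dl s s = pvFmt dl s := by
  simp [pvBuildB, PySem.List.pyRange_one_singleton, pvJoin_cons]
  rfl

lemma pvBuildB_cons (dl : List (List (String × String))) (s e : Int) (h : s ≤ e) :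
    pvBuildB dl s e = pvFmt dl s ++ pvBuildB dl (s + 1) e := by
  unfold pvBuildB
  rw [PySem.List.pyRange_one_cons (show s < e + 1 by omega), List.map_cons, pvJoin_cons]

lemma pvFindEnd_isSome (dl : List (List (String × String))) (mx : Int) :
    ∀ (fuel : Nat) (s : Int) (cc : Int),
      (dl.length : Int) ≤ s + fuel → s < (dl.length : Int) →
      (pvFindEnd dl mx (PySem.List.pyRange s (dl.length : Int) 1) cc).isSome := by
  intro fuel
  induction fuel with
  | zero => intro s cc h1 h2; push_cast at h1; omega
  | succ f ih =>
    intro s cc h1 h2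
    rw [PySem.List.pyRange_one_cons h2]
    by_cases hc : cc + PySem.Str.len (pvLineAt dl s) > mx ∨ s = (dl.length : Int) - 1
    · simp only [pvFindEnd, if_pos hc, Option.isSome_some]
    · have hne : s ≠ (dl.length : Int) - 1 := fun h => hc (Or.inr h)
      simp only [pvFindEnd, if_neg hc]
      exact ih (s + 1) _ (by push_cast at h1 ⊢; omega) (by omega)

lemma pvKey (dl : List (List (String × String))) (mx : Int) :
    ∀ (fuel : Nat) (s : Int) (acc : String) (cc : Int) (e : Int),
      (dl.length : Int) ≤ s + fuel → s < (dl.length : Int) →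
      pvFindEnd dl mx (PySem.List.pyRange s (dl.length : Int) 1) cc = some e →
      s ≤ e ∧
      pvLoopA dl mx (PySem.List.pyRange s (dl.length : Int) 1) acc cc
        = (acc ++ pvBuildB dl s e, e) := by
  intro fuel
  induction fuel with
  | zero => intro s acc cc e h1 h2 _; push_cast at h1; omega
  | succ f ih =>
    intro s acc cc e h1 h2 hfe
    rw [PySem.List.pyRange_one_cons h2] at hfe ⊢
    by_cases hc : cc + PySem.Str.len (pvLineAt dl s) > mx ∨ s = (dl.length : Int) - 1
    · simp only [pvFindEnd, if_pos hc] at hfe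
      injection hfe with hes
      subst hes
      refine ⟨le_refl s, ?_⟩
      simp only [pvLoopA, if_pos hc]
      rw [pvBuildB_singleton]
      simp [pvFmt, String.append_assoc]
    · have hne : s ≠ (dl.length : Int) - 1 := fun h => hc (Or.inr h)
      simp only [pvFindEnd, if_neg hc] at hfe
      obtain ⟨h1e, h2e⟩ := ih (s + 1)
        (acc ++ "[" ++ PySem.Int.toStr s ++ "] " ++ pvLineAt dl s ++ "\n")
        (cc + PySem.Str.len (pvLineAt dl s)) e
        (by push_cast at h1 ⊢; omega) (by omega) hfe
      refine ⟨by omega, ?_⟩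
      simp only [pvLoopA, if_neg hc]
      rw [h2e, pvBuildB_cons dl s e (by omega)]
      simp [pvFmt, String.append_assoc]

-- ===== VERDICT (by name: the statement is the Claim_ definition above) =====
theorem get_document_with_lines_spec : Claim_equal_get_document_with_lines := by
  intro dl s mx _ hpre
  obtain ⟨h1, h2, -⟩ := hpre
  have hs := pvFindEnd_isSome dl mx (2 * dl.length) s 0 (by push_cast; omega) h2
  obtain ⟨e, he⟩ := Option.isSome_iff_exists.mp hs
  obtain ⟨_, hk⟩ := pvKey dl mx (2 * dl.length) s "" 0 e (by push_cast; omega) h2 he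
  unfold Spec_get_document_with_lines get_document_with_lines get_document_with_lines_alt
  rw [he, hk]
  simp
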